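-- pv_equiv track=rewrite | github.com/njvz/Introduction-To-Python | ps3/ps3pr2.py | cube_evens_rec
-- ===== SOURCE A (Python) =====
-- def cube_evens_rec(values):
--      """ takes a list of numbers and returns a list containing
--          the cubes of the even numbers
--      """
--      if values == [] :
--         return []
--      else :
--         cube_rest = cube_evens_rec(values[1:])
--         if values[0] % 2 == 0 :
--             return [values[0]**3] + cube_rest
--         else :
--             return cube_rest
-- ===== SOURCE B (Python) =====
-- def cube_evens_rec(values):
--     """ takes a list of numbers and returns a list containing
--         the cubes of the even numbers
--     """
--     result = []
--     for v in values:
--         if v % 2 == 0: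
--             result.append(v**3)
--     return result
-- ===== Notes on version B (the rewrite author's own statement) =====
-- stated objective: idiomatic
-- what changed: Replaced the quadratic slicing recursion with a single left-to-right loop that appends cubes of even elements to an accumulator list.
import Mathlib
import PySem

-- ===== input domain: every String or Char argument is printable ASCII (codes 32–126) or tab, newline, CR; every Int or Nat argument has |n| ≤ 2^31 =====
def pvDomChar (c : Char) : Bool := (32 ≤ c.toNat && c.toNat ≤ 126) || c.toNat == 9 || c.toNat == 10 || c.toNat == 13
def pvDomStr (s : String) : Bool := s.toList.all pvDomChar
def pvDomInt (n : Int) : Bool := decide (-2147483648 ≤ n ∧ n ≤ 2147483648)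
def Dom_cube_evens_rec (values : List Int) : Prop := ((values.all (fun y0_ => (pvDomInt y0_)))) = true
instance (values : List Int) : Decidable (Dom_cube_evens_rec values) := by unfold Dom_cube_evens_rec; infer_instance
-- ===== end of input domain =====

-- B replaces A's slicing recursion by a single accumulator loop (idiomatic, linear).

-- ===== PORT A =====
-- literal port of A: recursion on values[1:], prepending the cube when the head is even
def cube_evens_rec (values : List Int) : List Int :=
  match values with
  | [] => []
  | v :: rest =>
    let cube_rest := cube_evens_rec rest
    if PySem.Int.mod v 2 = 0 then [v ^ 3] ++ cube_rest else cube_rest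

-- ===== PORT B =====
-- loop body of Source B: fold over values, appending v**3 to the accumulator when even
def cubeEvensLoop (acc : List Int) (vs : List Int) : List Int :=
  vs.foldl (fun result v => if PySem.Int.mod v 2 = 0 then result ++ [v ^ 3] else result) acc

def cube_evens_rec_alt (values : List Int) : List Int :=
  cubeEvensLoop [] values

-- ===== PRECONDITION & SPEC =====
def Spec_cube_evens_rec (values : List Int) (out : List Int) : Prop := out = cube_evens_rec_alt values
instance (values : List Int) (out : List Int) : Decidable (Spec_cube_evens_rec values out) := by unfold Spec_cube_evens_rec; infer_instance

-- ===== CLAIM (what is proved, stated in full; the proofs are below) =====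
def Claim_equal_cube_evens_rec : Prop := ∀ (values : List Int), Dom_cube_evens_rec values → Spec_cube_evens_rec values (cube_evens_rec values)

-- ===== LEMMAS AND PROOFS =====
-- loop invariant: the fold appends the recursively-computed cubes to the accumulator
theorem cubeEvensLoop_eq (acc vs : List Int) :
    cubeEvensLoop acc vs = acc ++ cube_evens_rec vs := by
  induction vs generalizing acc with
  | nil => simp [cubeEvensLoop, cube_evens_rec]
  | cons v rest ih =>
    unfold cubeEvensLoop at ih ⊢
    rw [List.foldl_cons, cube_evens_rec]
    by_cases h : PySem.Int.mod v 2 = 0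
    · rw [if_pos h, if_pos h, ih]; simp
    · rw [if_neg h, if_neg h]; exact ih acc

-- ===== VERDICT (by name: the statement is the Claim_ definition above) =====
theorem cube_evens_rec_spec : Claim_equal_cube_evens_rec := by
  intro values _
  unfold Spec_cube_evens_rec cube_evens_rec_alt
  simp [cubeEvensLoop_eq]
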